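-- pv_equiv track=rewrite | github.com/SeonmeseonStudy/AlgorithmStudy | 정민선/프로그래머스/양궁대회.py | solution
-- ===== SOURCE A (Python) =====
-- from itertools import product
--
-- def solution(n, info):
--     answer = [-1]
--     info.reverse()
--     max_diff = 0
--
--     for game in product((True, False), repeat=11):
--         arrows = 0
--         apeach = 0
--         ryan = 0
--
--         for i in range(11):
--             if game[i]: # 게임 진행
--                 arrows += info[i] + 1 # 어피치보다 1개 더 맞힘
--                 ryan += i
--             else:
--                 if info[i] > 0: # 어피치 점수 획득
--                     apeach += i
--         if arrows > n:
--             continue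
--
--         diff = ryan-apeach
--         if diff > max_diff:
--             max_diff = diff
--             answer = []
--             for i in range(11):
--                 if game[i]:
--                     answer.append(info[i]+1)
--                 else:
--                     answer.append(0)
--             answer[0] += n-arrows
--
--     answer.reverse()
--     return answer
-- ===== SOURCE B (Python) =====
-- def solution(n, info):
--     info.reverse()
--     state = [0, None]  # [max_diff, best (choice, arrows)]
--
--     def dfs(i, arrows, ryan, apeach, choice):
--         if i == 11:
--             if arrows <= n:
--                 diff = ryan - apeach
--                 if diff > state[0]:
--                     state[0] = diff
--                     state[1] = (choice[:], arrows)
--             return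
--         v = info[i]
--         choice.append(True)
--         dfs(i + 1, arrows + v + 1, ryan + i, apeach, choice)
--         choice[-1] = False
--         dfs(i + 1, arrows, ryan, apeach + (i if v > 0 else 0), choice)
--         choice.pop()
--
--     dfs(0, 0, 0, 0, [])
--     if state[1] is None:
--         answer = [-1]
--     else:
--         choice, arrows = state[1]
--         answer = [info[i] + 1 if c else 0 for i, c in enumerate(choice)]
--         answer[0] += n - arrows
--     answer.reverse()
--     return answer
-- ===== Notes on version B (the rewrite author's own statement) =====
-- stated objective: alternative
-- what changed: Replaces A's itertools.product enumeration of all 2^11 games (recomputing arrows/apeach/ryan from scratch per game) with a recursive DFS over the 11 zones that accumulates the three sums incrementally and records only the best choice vector, reconstructing the answer once after the search.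
import Mathlib
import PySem

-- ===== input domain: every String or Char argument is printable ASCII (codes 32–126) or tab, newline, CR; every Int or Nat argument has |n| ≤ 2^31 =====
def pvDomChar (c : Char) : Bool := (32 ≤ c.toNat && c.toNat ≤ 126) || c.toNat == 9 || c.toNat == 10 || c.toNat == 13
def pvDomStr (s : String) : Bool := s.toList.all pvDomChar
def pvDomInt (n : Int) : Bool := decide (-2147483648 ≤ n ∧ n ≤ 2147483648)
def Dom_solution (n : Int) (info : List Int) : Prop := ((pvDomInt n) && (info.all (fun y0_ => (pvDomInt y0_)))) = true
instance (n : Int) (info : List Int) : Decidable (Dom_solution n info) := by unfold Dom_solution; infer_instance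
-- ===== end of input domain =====

-- B replaces A's `itertools.product` enumeration of all 2^11 games by a recursive DFS over
-- the zones that accumulates arrows/ryan/apeach incrementally and records only the best
-- choice vector, reconstructing the answer once at the end (alternative decomposition;
-- return-value equivalence — both A and B reverse `info` in place the same way).

-- ===== PORT A =====
-- inner `for i in range(11)` loop of A, computing (arrows, apeach, ryan); `m` is 11 at the call
def pvSumsAux (infoR : List Int) (game : List Bool) (m : Nat) : Int × Int × Int :=
  (List.range m).foldl
    (fun t i =>
      if game.getD i false then (t.1 + infoR.getD i 0 + 1, t.2.1, t.2.2 + (i : Int))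
      else if infoR.getD i 0 > 0 then (t.1, t.2.1 + (i : Int), t.2.2)
      else t)
    (0, 0, 0)

-- A's answer-building loop plus `answer[0] += n - arrows`
def pvBuildA (n : Int) (infoR : List Int) (game : List Bool) (arrows : Int) : List Int :=
  let ans := (List.range 11).map (fun i => if game.getD i false then infoR.getD i 0 + 1 else 0)
  match ans with
  | [] => []
  | a :: rest => (a + (n - arrows)) :: rest

-- one iteration of A's `for game in product(...)` loop body, state = (max_diff, answer)
def pvStepA (n : Int) (infoR : List Int) (s : Int × List Int) (game : List Bool) : Int × List Int :=
  let t := pvSumsAux infoR game 11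
  if t.1 > n then s
  else if t.2.2 - t.2.1 > s.1 then (t.2.2 - t.2.1, pvBuildA n infoR game t.1) else s

-- product((True, False), repeat=k), first coordinate outermost, True before False
def pvAllGames : Nat → List (List Bool)
  | 0 => [[]]
  | k + 1 => [true, false].flatMap (fun b => (pvAllGames k).map (fun g => b :: g))

def solution (n : Int) (info : List Int) : List Int :=
  let infoR := info.reverse
  let s := (pvAllGames 11).foldl (pvStepA n infoR) (0, [-1])
  s.2.reverse

-- ===== PORT B =====
-- B's recursive dfs; state = (max_diff, best (choice, arrows))
def pvDfs (n : Int) (infoR : List Int) :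
    Nat → Int → Int → Int → List Bool → Int × Option (List Bool × Int) →
    Int × Option (List Bool × Int)
  | i, arrows, ryan, apeach, choice, st =>
    if _h : i < 11 then
      let v := infoR.getD i 0
      let st1 := pvDfs n infoR (i + 1) (arrows + v + 1) (ryan + (i : Int)) apeach (choice ++ [true]) st
      pvDfs n infoR (i + 1) arrows ryan (apeach + (if v > 0 then (i : Int) else 0)) (choice ++ [false]) st1
    else
      if arrows ≤ n then
        let diff := ryan - apeach
        if diff > st.1 then (diff, some (choice, arrows)) else st
      else st
  termination_by i => 11 - i

-- B's final reconstruction: comprehension over enumerate(choice), then answer[0] += n - arrows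
def pvBuildB (n : Int) (infoR : List Int) (choice : List Bool) (arrows : Int) : List Int :=
  let ans := choice.zipIdx.map (fun p => if p.1 then infoR.getD p.2 0 + 1 else 0)
  match ans with
  | [] => []
  | a :: rest => (a + (n - arrows)) :: rest

def solution_alt (n : Int) (info : List Int) : List Int :=
  let infoR := info.reverse
  let st := pvDfs n infoR 0 0 0 0 [] (0, none)
  let answer : List Int :=
    match st.2 with
    | none => [-1]
    | some (choice, arrows) => pvBuildB n infoR choice arrows
  answer.reverse

-- ===== PRECONDITION & SPEC =====
-- Pre_ excludes exactly the inputs where Python A raises IndexError: it indexes info[0..10]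
def Pre_solution (_n : Int) (info : List Int) : Prop := 11 ≤ info.length
instance (n : Int) (info : List Int) : Decidable (Pre_solution n info) := by unfold Pre_solution; infer_instance
def pvWitness_solution : Int × List Int := (5, [0, 0, 0, 0, 0, 0, 0, 0, 0, 0, 0])

def Spec_solution (n : Int) (info : List Int) (out : List Int) : Prop := out = solution_alt n info
instance (n : Int) (info : List Int) (out : List Int) : Decidable (Spec_solution n info out) := by unfold Spec_solution; infer_instance

-- ===== CLAIM (what is proved, stated in full; the proofs are below) =====
def Claim_equal_solution : Prop := ∀ (n : Int) (info : List Int), Dom_solution n info → Pre_solution n info → Spec_solution n info (solution n info)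

-- ===== LEMMAS AND PROOFS =====

-- the leaf update, phrased on B's state but with A's recomputed sums
def pvLeafB (n : Int) (infoR : List Int) (game : List Bool) (b : Int × Option (List Bool × Int)) :
    Int × Option (List Bool × Int) :=
  let t := pvSumsAux infoR game 11
  if t.1 > n then b
  else if t.2.2 - t.2.1 > b.1 then (t.2.2 - t.2.1, some (game, t.1)) else b

-- abstraction from B's state to A's state
def pvAbs (n : Int) (infoR : List Int) (b : Int × Option (List Bool × Int)) : Int × List Int :=
  (b.1, match b.2 with
        | none => [-1]
        | some (c, ar) => pvBuildA n infoR c ar)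

lemma pvSums_stable (infoR : List Int) (choice ext : List Bool) (m : Nat)
    (h : m ≤ choice.length) :
    pvSumsAux infoR (choice ++ ext) m = pvSumsAux infoR choice m := by
  unfold pvSumsAux
  apply List.foldl_ext
  intro t i hi
  have hi' : i < choice.length := lt_of_lt_of_le (List.mem_range.mp hi) h
  rw [List.getD_append _ _ _ _ hi']

lemma pvSums_step (infoR : List Int) (choice : List Bool) (b : Bool) :
    pvSumsAux infoR (choice ++ [b]) (choice.length + 1)
      = (fun t i =>
          if (choice ++ [b]).getD i false then (t.1 + infoR.getD i 0 + 1, t.2.1, t.2.2 + (i : Int))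
          else if infoR.getD i 0 > 0 then (t.1, t.2.1 + (i : Int), t.2.2)
          else t)
        (pvSumsAux infoR choice choice.length) choice.length := by
  conv_lhs => rw [pvSumsAux, List.range_succ, List.foldl_append]
  rw [List.foldl_cons, List.foldl_nil]
  rw [show (List.range choice.length).foldl _ (0,0,0) = pvSumsAux infoR (choice ++ [b]) choice.length from rfl]
  rw [pvSums_stable _ _ _ _ le_rfl]

lemma getD_snoc_self (choice : List Bool) (b : Bool) :
    (choice ++ [b]).getD choice.length false = b := by
  rw [List.getD_eq_getElem?_getD, List.getElem?_append_right le_rfl]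
  simp

-- the DFS equals a fold of the leaf update over all suffix games
lemma pvDfs_eq_fold (n : Int) (infoR : List Int) :
    ∀ (k i : Nat) (choice : List Bool) (st : Int × Option (List Bool × Int)),
      i + k = 11 → choice.length = i →
      pvDfs n infoR i (pvSumsAux infoR choice i).1 (pvSumsAux infoR choice i).2.2
          (pvSumsAux infoR choice i).2.1 choice st
        = (pvAllGames k).foldl (fun b g => pvLeafB n infoR (choice ++ g) b) st := by
  intro k
  induction k with
  | zero =>
    intro i choice st hik hlen
    subst hik
    rw [pvDfs]
    simp only [Nat.lt_irrefl, dite_false, pvAllGames, List.foldl_cons, List.foldl_nil,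
      List.append_nil]
    unfold pvLeafB
    rw [← hlen]
    by_cases h1 : (pvSumsAux infoR choice choice.length).1 ≤ n
    · rw [if_pos h1, if_neg (not_lt.mpr h1)]
    · rw [if_neg h1, if_pos (lt_of_not_ge h1)]
  | succ k ih =>
    intro i choice st hik hlen
    have hi : i < 11 := by omega
    rw [pvDfs]
    simp only [hi, dite_true]
    have hlen' : ∀ b : Bool, (choice ++ [b]).length = i + 1 := by
      intro b; simp [hlen]
    have hsum : ∀ b : Bool,
        pvSumsAux infoR (choice ++ [b]) (i + 1)
          = (fun t =>
              if b then (t.1 + infoR.getD i 0 + 1, t.2.1, t.2.2 + (i : Int))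
              else if infoR.getD i 0 > 0 then (t.1, t.2.1 + (i : Int), t.2.2)
              else t) (pvSumsAux infoR choice i) := by
      intro b
      have := pvSums_step infoR choice b
      rw [hlen] at this
      rw [this, ← hlen]
      simp only [getD_snoc_self]
    have htrue := hsum true
    have hfalse := hsum false
    simp only [if_true] at htrue hfalse
    have step1 :
        pvDfs n infoR (i + 1) ((pvSumsAux infoR choice i).1 + infoR.getD i 0 + 1)
            ((pvSumsAux infoR choice i).2.2 + (i : Int)) (pvSumsAux infoR choice i).2.1
            (choice ++ [true]) st
          = (pvAllGames k).foldl (fun b g => pvLeafB n infoR ((choice ++ [true]) ++ g) b) st := by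
      have := ih (i + 1) (choice ++ [true]) st (by omega) (hlen' true)
      rw [htrue] at this
      exact this
    have step2 : ∀ st1,
        pvDfs n infoR (i + 1) (pvSumsAux infoR choice i).1 (pvSumsAux infoR choice i).2.2
            ((pvSumsAux infoR choice i).2.1 + (if infoR.getD i 0 > 0 then (i : Int) else 0))
            (choice ++ [false]) st1
          = (pvAllGames k).foldl (fun b g => pvLeafB n infoR ((choice ++ [false]) ++ g) b) st1 := by
      intro st1
      have := ih (i + 1) (choice ++ [false]) st1 (by omega) (hlen' false)
      rw [hfalse] at this
      by_cases hp : infoR.getD i 0 > 0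
      · simp only [hp, if_true] at this ⊢; exact this
      · simp only [hp, if_false, add_zero] at this ⊢; exact this
    rw [step1, step2]
    have assoc : ∀ (b : Bool) (g : List Bool), (choice ++ [b]) ++ g = choice ++ b :: g := by
      intro b g; rw [List.append_assoc, List.singleton_append]
    conv_rhs => rw [pvAllGames]
    simp only [List.flatMap_cons, List.flatMap_nil, List.append_nil, List.foldl_append,
      List.foldl_map]
    simp only [assoc]

-- one loop iteration of A simulates one leaf update of B
lemma pvStep_sim (n : Int) (infoR : List Int) (b : Int × Option (List Bool × Int)) (g : List Bool) :
    pvStepA n infoR (pvAbs n infoR b) g = pvAbs n infoR (pvLeafB n infoR g b) := by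
  unfold pvStepA pvLeafB pvAbs
  by_cases h1 : (pvSumsAux infoR g 11).1 > n
  · simp [h1]
  · by_cases h2 : (pvSumsAux infoR g 11).2.2 - (pvSumsAux infoR g 11).2.1 > b.1
    · simp [h1, h2]
    · simp [h1, h2]

lemma pvFold_sim (n : Int) (infoR : List Int) (gs : List (List Bool))
    (b : Int × Option (List Bool × Int)) :
    gs.foldl (pvStepA n infoR) (pvAbs n infoR b)
      = pvAbs n infoR (gs.foldl (fun b g => pvLeafB n infoR g b) b) := by
  induction gs generalizing b with
  | nil => rfl
  | cons g gs ih => rw [List.foldl_cons, List.foldl_cons, pvStep_sim, ih]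

lemma pvAllGames_length : ∀ (k : Nat) (g : List Bool), g ∈ pvAllGames k → g.length = k := by
  intro k
  induction k with
  | zero => intro g hg; simp [pvAllGames] at hg; simp [hg]
  | succ k ih =>
    intro g hg
    simp only [pvAllGames, List.flatMap_cons, List.flatMap_nil, List.append_nil,
      List.mem_append, List.mem_map] at hg
    rcases hg with ⟨g', hg', rfl⟩ | ⟨g', hg', rfl⟩ <;> simp [ih g' hg']

lemma pvFold_inv (n : Int) (infoR : List Int) (gs : List (List Bool))
    (b : Int × Option (List Bool × Int))
    (hgs : ∀ g ∈ gs, g.length = 11)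
    (hb : ∀ c ar, b.2 = some (c, ar) → c.length = 11) :
    ∀ c ar, (gs.foldl (fun b g => pvLeafB n infoR g b) b).2 = some (c, ar) → c.length = 11 := by
  induction gs generalizing b with
  | nil => exact hb
  | cons g gs ih =>
    rw [List.foldl_cons]
    apply ih
    · intro g' hg'; exact hgs g' (List.mem_cons_of_mem _ hg')
    · intro c ar hc
      unfold pvLeafB at hc
      by_cases h1 : (pvSumsAux infoR g 11).1 > n
      · simp only [h1, if_true] at hc; exact hb c ar hc
      · by_cases h2 : (pvSumsAux infoR g 11).2.2 - (pvSumsAux infoR g 11).2.1 > b.1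
        · simp only [h1, if_false, h2, if_true] at hc
          have hgc : g = c := congrArg Prod.fst (Option.some.inj hc)
          exact hgc ▸ hgs g (List.mem_cons_self ..)
        · simp only [h1, if_false, h2, if_false] at hc; exact hb c ar hc

lemma pvBuild_eq (n : Int) (infoR : List Int) (choice : List Bool) (arrows : Int)
    (h : choice.length = 11) :
    pvBuildA n infoR choice arrows = pvBuildB n infoR choice arrows := by
  unfold pvBuildA pvBuildB
  have : (List.range 11).map (fun i => if choice.getD i false then infoR.getD i 0 + 1 else 0)
      = choice.zipIdx.map (fun p => if p.1 then infoR.getD p.2 0 + 1 else 0) := by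
    apply List.ext_getElem
    · simp [h]
    · intro j hj hj'
      simp only [List.getElem_map, List.getElem_range, List.getElem_zipIdx, Nat.zero_add]
      have hjc : j < choice.length := by simpa using hj'
      rw [List.getD_eq_getElem?_getD, List.getElem?_eq_getElem hjc]
      rfl
  rw [this]

-- ===== VERDICT (by name: the statement is the Claim_ definition above) =====
theorem solution_spec : Claim_equal_solution := by
  intro n info _ _
  unfold Spec_solution
  show ((pvAllGames 11).foldl (pvStepA n info.reverse) (0, [-1])).2.reverse
      = (match (pvDfs n info.reverse 0 0 0 0 [] ((0 : Int), none)).2 with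
         | none => ([-1] : List Int)
         | some (choice, arrows) => pvBuildB n info.reverse choice arrows).reverse
  have hdfs : pvDfs n info.reverse 0 0 0 0 [] (0, none)
      = (pvAllGames 11).foldl (fun b g => pvLeafB n info.reverse g b) (0, none) := by
    have := pvDfs_eq_fold n info.reverse 11 0 [] (0, none) rfl rfl
    simpa [pvSumsAux] using this
  have habs : ((0 : Int), ([-1] : List Int)) = pvAbs n info.reverse (0, none) := rfl
  rw [hdfs, habs, pvFold_sim]
  set res := (pvAllGames 11).foldl (fun b g => pvLeafB n info.reverse g b) ((0 : Int), none) with hres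
  have hinv := pvFold_inv n info.reverse (pvAllGames 11) (0, none)
    (fun g hg => pvAllGames_length 11 g hg) (by intro c ar h; exact absurd h (by simp))
  rw [← hres] at hinv
  unfold pvAbs
  cases hr : res.2 with
  | none => rfl
  | some p =>
    obtain ⟨c, ar⟩ := p
    simp only
    rw [pvBuild_eq n info.reverse c ar (hinv c ar hr)]
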